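-- pv_equiv track=rewrite | github.com/rhelmot/nx-glabvartrie | src/glabvartrie/database.py | _support_matrix
-- ===== SOURCE A (Python) =====
-- def _support_matrix(neighbours: tuple[tuple[int, ...], ...], neighbour_counts: tuple[int, ...]) -> tuple[tuple[bool, ...], ...]:
--     size = len(neighbours)
--     sequences = tuple(
--         tuple(sorted([neighbour_counts[other] if other in node_neighbours else 0 for other in range(size)], reverse=True))
--         for node_neighbours in neighbours
--     )
--     return tuple(
--         tuple(sequences[left] == sequences[right] for right in range(size))
--         for left in range(size)
--     )
-- ===== SOURCE B (Python) =====
-- def _support_matrix(neighbours, neighbour_counts):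
--     size = len(neighbours)
--     counters = []
--     for node_neighbours in neighbours:
--         c = {}
--         zeros = size
--         for o in set(node_neighbours):
--             if 0 <= o < size:
--                 w = neighbour_counts[o]
--                 c[w] = c.get(w, 0) + 1
--                 zeros -= 1
--         if zeros:
--             c[0] = c.get(0, 0) + zeros
--         counters.append(c)
--     return tuple(
--         tuple(counters[left] == counters[right] for right in range(size))
--         for left in range(size)
--     )
-- ===== Notes on version B (the rewrite author's own statement) =====
-- stated objective: faster
-- what changed: B never sorts: for each node it builds a count dictionary value->multiplicity (with implicit zeros tracked by a counter) representing the degree multiset, and the matrix compares these small dictionaries, instead of A's materialized, sorted, zero-padded length-n sequences compared element-wise.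
import Mathlib
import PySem

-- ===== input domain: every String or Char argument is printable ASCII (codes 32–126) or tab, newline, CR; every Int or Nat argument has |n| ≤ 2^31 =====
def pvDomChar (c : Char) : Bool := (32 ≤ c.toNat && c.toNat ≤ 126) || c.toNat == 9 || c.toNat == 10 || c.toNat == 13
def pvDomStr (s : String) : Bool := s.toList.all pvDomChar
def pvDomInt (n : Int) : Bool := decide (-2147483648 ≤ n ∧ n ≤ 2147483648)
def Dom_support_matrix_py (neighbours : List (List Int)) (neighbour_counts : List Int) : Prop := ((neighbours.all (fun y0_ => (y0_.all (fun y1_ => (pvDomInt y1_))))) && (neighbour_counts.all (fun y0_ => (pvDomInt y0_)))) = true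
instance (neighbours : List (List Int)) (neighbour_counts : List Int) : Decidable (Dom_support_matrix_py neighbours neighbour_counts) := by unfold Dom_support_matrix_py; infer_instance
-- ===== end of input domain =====

-- B never sorts: it represents each node's degree multiset as a count dictionary
-- (value -> multiplicity, implicit zeros tracked by a counter) and compares those
-- dictionaries, instead of A's sorted zero-padded length-n sequences (objective: faster).

-- ===== PORT A =====
def support_matrix_py (neighbours : List (List Int)) (neighbour_counts : List Int) : List (List Bool) :=
  let size : Int := neighbours.length
  let sequences : List (List Int) := neighbours.map (fun node_neighbours =>
    PySem.List.sorted ((PySem.List.pyRange 0 size 1).map (fun other =>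
      if other ∈ node_neighbours then PySem.List.pyGetD neighbour_counts other 0 else 0))
      (fun x => x) true)
  (PySem.List.pyRange 0 size 1).map (fun left =>
    (PySem.List.pyRange 0 size 1).map (fun right =>
      PySem.List.pyGetD sequences left [] == PySem.List.pyGetD sequences right []))

-- ===== PORT B =====
-- Python's '==' on dicts: same size and every (key, value) of the first found in the second
-- (order-insensitive, exactly Python's mapping equality for dicts with unique keys).
def dictPyEq (d1 d2 : PySem.Dict Int Int) : Bool :=
  d1.size == d2.size && d1.items.all (fun kv => d2.get? kv.1 == some kv.2)

-- The 'for o in set(node_neighbours)' loop is consumed order-insensitively (it builds a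
-- count dict compared only by dictPyEq and decrements a counter), so PySem.Set is exact here.
def support_matrix_py_alt (neighbours : List (List Int)) (neighbour_counts : List Int) : List (List Bool) :=
  let size : Int := neighbours.length
  let counters : List (PySem.Dict Int Int) := neighbours.foldl (fun acc node_neighbours =>
    let st := (PySem.Set.ofList node_neighbours).foldl
      (fun (st : PySem.Dict Int Int × Int) o =>
        if 0 ≤ o ∧ o < size then
          let w := PySem.List.pyGetD neighbour_counts o 0
          (st.1.insert w (st.1.getD w 0 + 1), st.2 - 1)
        else st)
      (PySem.Dict.empty, size)
    let c := if st.2 ≠ 0 then st.1.insert 0 (st.1.getD 0 0 + st.2) else st.1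
    acc ++ [c]) []
  (PySem.List.pyRange 0 size 1).map (fun left =>
    (PySem.List.pyRange 0 size 1).map (fun right =>
      dictPyEq (PySem.List.pyGetD counters left PySem.Dict.empty)
               (PySem.List.pyGetD counters right PySem.Dict.empty)))

-- ===== PRECONDITION & SPEC =====
-- Pre_ excludes exactly the inputs on which the Python A raises IndexError: some neighbour index o
-- with 0 ≤ o < len(neighbours) that is out of range for neighbour_counts.
def Pre_support_matrix_py (neighbours : List (List Int)) (neighbour_counts : List Int) : Prop :=
  ∀ nb ∈ neighbours, ∀ o ∈ nb, 0 ≤ o → o < (neighbours.length : Int) → o < (neighbour_counts.length : Int)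
instance (neighbours : List (List Int)) (neighbour_counts : List Int) : Decidable (Pre_support_matrix_py neighbours neighbour_counts) := by unfold Pre_support_matrix_py; infer_instance
def pvWitness_support_matrix_py : List (List Int) × List Int := ([[1], [0, 2]], [3, 4])

def Spec_support_matrix_py (neighbours : List (List Int)) (neighbour_counts : List Int) (out : List (List Bool)) : Prop := out = support_matrix_py_alt neighbours neighbour_counts
instance (neighbours : List (List Int)) (neighbour_counts : List Int) (out : List (List Bool)) : Decidable (Spec_support_matrix_py neighbours neighbour_counts out) := by unfold Spec_support_matrix_py; infer_instance

-- ===== CLAIM (what is proved, stated in full; the proofs are below) =====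
def Claim_equal_support_matrix_py : Prop := ∀ (neighbours : List (List Int)) (neighbour_counts : List Int), Dom_support_matrix_py neighbours neighbour_counts → Pre_support_matrix_py neighbours neighbour_counts → Spec_support_matrix_py neighbours neighbour_counts (support_matrix_py neighbours neighbour_counts)

-- ===== LEMMAS AND PROOFS =====

-- A's per-node value list (before sorting), over indices 0..n-1.
def rowList (nc : List Int) (n : Nat) (nb : List Int) : List Int :=
  (PySem.List.pyRange 0 (n : Int) 1).map (fun other =>
    if other ∈ nb then PySem.List.pyGetD nc other 0 else 0)

-- The in-range members of set(nb), mapped to their counts (B's nonzero contributions).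
def memVals (nc : List Int) (n : Nat) (nb : List Int) : List Int :=
  ((PySem.Set.ofList nb).filter (fun o => decide (0 ≤ o ∧ o < (n : Int)))).map
    (fun o => PySem.List.pyGetD nc o 0)

-- B's per-node counter dictionary.
def cFun (nc : List Int) (n : Nat) (nb : List Int) : PySem.Dict Int Int :=
  let st := (PySem.Set.ofList nb).foldl
    (fun (st : PySem.Dict Int Int × Int) o =>
      if 0 ≤ o ∧ o < ((n : Nat) : Int) then
        let w := PySem.List.pyGetD nc o 0
        (st.1.insert w (st.1.getD w 0 + 1), st.2 - 1)
      else st)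
    (PySem.Dict.empty, (n : Int))
  if st.2 ≠ 0 then st.1.insert 0 (st.1.getD 0 0 + st.2) else st.1

theorem fold_step_eq (nc : List Int) (m : Int) (L : List Int) (d : PySem.Dict Int Int) (z : Int) :
    L.foldl (fun (st : PySem.Dict Int Int × Int) o =>
      if 0 ≤ o ∧ o < m then
        let w := PySem.List.pyGetD nc o 0
        (st.1.insert w (st.1.getD w 0 + 1), st.2 - 1)
      else st) (d, z)
    = (((L.filter (fun o => decide (0 ≤ o ∧ o < m))).map (fun o => PySem.List.pyGetD nc o 0)).foldl
        (fun d w => d.insert w (d.getD w 0 + 1)) d,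
       z - (L.countP (fun o => decide (0 ≤ o ∧ o < m)))) := by
  induction L generalizing d z with
  | nil => simp
  | cons x L ih =>
    by_cases hx : 0 ≤ x ∧ x < m
    · rw [List.foldl_cons, if_pos hx, ih]
      rw [Prod.ext_iff]
      refine ⟨?_, ?_⟩
      · simp [hx]
      · simp [hx]
        omega
    · rw [List.foldl_cons, if_neg hx, ih]
      rw [Prod.ext_iff]
      refine ⟨?_, ?_⟩
      · simp [hx]
      · simp [hx]

theorem memVals_perm (nc : List Int) (n : Nat) (nb : List Int) :
    (memVals nc n nb).Perm
      (((PySem.List.pyRange 0 (n : Int) 1).filter (fun o => decide (o ∈ nb))).map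
        (fun o => PySem.List.pyGetD nc o 0)) := by
  apply List.Perm.map
  refine (List.perm_ext_iff_of_nodup ?_ ?_).mpr ?_
  · exact (PySem.Set.nodup_ofList nb).filter _
  · exact (PySem.List.nodup_pyRange_one 0 (n : Int)).filter _
  · intro o
    simp [List.mem_filter, PySem.Set.mem_ofList, PySem.List.mem_pyRange_one, and_comm]


theorem len_memVals_le (nc : List Int) (n : Nat) (nb : List Int) :
    (memVals nc n nb).length ≤ n := by
  rw [(memVals_perm nc n nb).length_eq]
  calc (((PySem.List.pyRange 0 (n : Int) 1).filter (fun o => decide (o ∈ nb))).map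
        (fun o => PySem.List.pyGetD nc o 0)).length
      = ((PySem.List.pyRange 0 (n : Int) 1).filter (fun o => decide (o ∈ nb))).length := by
        rw [List.length_map]
    _ ≤ (PySem.List.pyRange 0 (n : Int) 1).length := List.length_filter_le _ _
    _ = n := by simp [PySem.List.length_pyRange_one]


theorem count_rowList (nc : List Int) (n : Nat) (nb : List Int) (v : Int) :
    (rowList nc n nb).count v
      = (memVals nc n nb).count v + (if v = 0 then n - (memVals nc n nb).length else 0) := by
  classical
  set R := PySem.List.pyRange 0 (n : Int) 1 with hR
  set q : Int → Bool := fun o => decide (o ∈ nb) with hq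
  set f : Int → Int := fun other => if other ∈ nb then PySem.List.pyGetD nc other 0 else 0 with hf
  have hperm : ((R.filter q ++ R.filter (fun o => !q o)).map f).Perm (rowList nc n nb) :=
    (List.filter_append_perm q R).map f
  rw [← hperm.count_eq, List.map_append, List.count_append]
  have h1 : ((R.filter q).map f).count v = (memVals nc n nb).count v := by
    have hcongr : (R.filter q).map f = (R.filter q).map (fun o => PySem.List.pyGetD nc o 0) := by
      apply List.map_congr_left
      intro o ho
      have : o ∈ nb := by simpa [hq] using (List.mem_filter.mp ho).2
      simp [hf, this]
    rw [hcongr, ← (memVals_perm nc n nb).count_eq]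
  have h2 : (R.filter (fun o => !q o)).map f
      = List.replicate ((R.filter (fun o => !q o)).length) 0 := by
    rw [List.eq_replicate_iff]
    refine ⟨by simp, ?_⟩
    intro b hb
    obtain ⟨o, ho, rfl⟩ := List.mem_map.mp hb
    have : ¬ o ∈ nb := by simpa [hq] using (List.mem_filter.mp ho).2
    simp [hf, this]
  have hlenf : (R.filter (fun o => !q o)).length = n - (memVals nc n nb).length := by
    have hsum : (R.filter q).length + (R.filter (fun o => !q o)).length = n := by
      have := (List.filter_append_perm q R).length_eq
      simp only [List.length_append] at this
      rw [this, hR]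
      simp [PySem.List.length_pyRange_one]
    have hm : (memVals nc n nb).length = (R.filter q).length := by
      rw [(memVals_perm nc n nb).length_eq, List.length_map]
    omega
  rw [h1, h2, hlenf, List.count_replicate]
  by_cases hv : v = 0
  · simp [hv]
  · simp [hv, Ne.symm hv]


theorem cFun_eq (nc : List Int) (n : Nat) (nb : List Int) :
    cFun nc n nb =
      (if ((n : Int) - (memVals nc n nb).length) ≠ 0 then
        ((memVals nc n nb).foldl (fun d w => d.insert w (d.getD w 0 + 1)) (PySem.Dict.empty : PySem.Dict Int Int)).insert 0
          (((memVals nc n nb).foldl (fun d w => d.insert w (d.getD w 0 + 1)) (PySem.Dict.empty : PySem.Dict Int Int)).getD 0 0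
            + ((n : Int) - (memVals nc n nb).length))
      else (memVals nc n nb).foldl (fun d w => d.insert w (d.getD w 0 + 1)) (PySem.Dict.empty : PySem.Dict Int Int)) := by
  unfold cFun
  rw [fold_step_eq]
  have hc : ((PySem.Set.ofList nb).countP (fun o => decide (0 ≤ o ∧ o < (n : Int))) : Int)
      = ((memVals nc n nb).length : Int) := by
    rw [List.countP_eq_length_filter]
    simp [memVals]
  simp only [memVals] at hc ⊢
  rw [hc]


theorem getD_cFun (nc : List Int) (n : Nat) (nb : List Int) (v : Int) :
    (cFun nc n nb).getD v 0 = ((rowList nc n nb).count v : Int) := by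
  have hle := len_memVals_le nc n nb
  rw [cFun_eq, count_rowList]
  set M := memVals nc n nb with hM
  by_cases hz : ((n : Int) - M.length) ≠ 0
  · rw [if_pos hz, PySem.Dict.getD_insert]
    by_cases hv : v = 0
    · rw [if_pos hv, PySem.Dict.getD_foldl_insert_add_one, PySem.Dict.getD_empty, hv]
      push_cast
      omega
    · rw [if_neg hv, PySem.Dict.getD_foldl_insert_add_one, PySem.Dict.getD_empty]
      simp [hv]
  · rw [if_neg hz, PySem.Dict.getD_foldl_insert_add_one, PySem.Dict.getD_empty]
    have : n = M.length := by omega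
    by_cases hv : v = 0 <;> simp [hv, this]


theorem keys_bumpfold (M : List Int) :
    ((M.foldl (fun d w => d.insert w (d.getD w 0 + 1)) (PySem.Dict.empty : PySem.Dict Int Int)).keys : List Int)
      = PySem.Set.ofList M := by
  rw [PySem.Dict.keys_foldl_insert M (fun d x => d.getD x 0 + 1) PySem.Dict.empty,
    PySem.Dict.keys_empty, PySem.Set.ofList_eq_foldl]
  rfl


theorem get?_cFun_none_iff (nc : List Int) (n : Nat) (nb : List Int) (v : Int) :
    (cFun nc n nb).get? v = none ↔ (rowList nc n nb).count v = 0 := by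
  have hle := len_memVals_le nc n nb
  rw [PySem.Dict.get?_eq_none_iff_not_mem_keys, cFun_eq, count_rowList]
  set M := memVals nc n nb with hM
  have hmemkeys : ∀ w : Int,
      w ∈ (M.foldl (fun d w => d.insert w (d.getD w 0 + 1)) (PySem.Dict.empty : PySem.Dict Int Int)).keys ↔ w ∈ M := by
    intro w
    rw [keys_bumpfold, PySem.Set.mem_ofList]
  by_cases hz : ((n : Int) - M.length) ≠ 0
  · rw [if_pos hz]
    rw [PySem.Dict.mem_keys_insert]
    rw [hmemkeys]
    constructor
    · intro h
      push Not at h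
      rw [← List.count_pos_iff] at h
      have hv0 : v ≠ 0 := h.1
      have : M.count v = 0 := by omega
      simp [this, hv0]
    · intro h
      have hnlen : n ≠ M.length := by omega
      by_cases hv : v = 0
      · simp [hv] at h
        omega
      · simp [hv] at h
        push Not
        exact ⟨hv, by rw [← List.count_pos_iff]; omega⟩
  · rw [if_neg hz]
    rw [hmemkeys]
    have hn : n - M.length = 0 := by omega
    rw [hn]
    simp [List.count_eq_zero]


theorem get?_cFun_char (nc : List Int) (n : Nat) (nb : List Int) (v : Int) :
    (cFun nc n nb).get? v
      = if (rowList nc n nb).count v = 0 then none else some ((rowList nc n nb).count v : Int) := by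
  by_cases h : (rowList nc n nb).count v = 0
  · rw [if_pos h, (get?_cFun_none_iff nc n nb v).mpr h]
  · rw [if_neg h]
    cases hv : (cFun nc n nb).get? v with
    | none => exact absurd ((get?_cFun_none_iff nc n nb v).mp hv) h
    | some w =>
      have := PySem.Dict.getD_of_get?_eq_some (cFun nc n nb) 0 hv
      rw [getD_cFun] at this
      rw [← this]


theorem nodup_keys_cFun (nc : List Int) (n : Nat) (nb : List Int) :
    (cFun nc n nb).keys.Nodup := by
  rw [cFun_eq]
  have hbase : ((memVals nc n nb).foldl (fun d w => d.insert w (d.getD w 0 + 1))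
      (PySem.Dict.empty : PySem.Dict Int Int)).keys.Nodup :=
    PySem.Dict.nodup_keys_foldl_insert _ (fun (d : PySem.Dict Int Int) x => d.getD x 0 + 1) _ PySem.Dict.nodup_keys_empty
  by_cases hz : ((n : Int) - (memVals nc n nb).length) ≠ 0
  · rw [if_pos hz]
    exact PySem.Dict.nodup_keys_insert _ _ _ hbase
  · rw [if_neg hz]
    exact hbase


theorem size_eq_keys_length (d : PySem.Dict Int Int) : d.size = d.keys.length := by
  simp [PySem.Dict.size, PySem.Dict.keys]


theorem mem_keys_iff_get?_ne_none (d : PySem.Dict Int Int) (k : Int) :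
    k ∈ d.keys ↔ d.get? k ≠ none := by
  have := PySem.Dict.get?_eq_none_iff_not_mem_keys d k
  constructor
  · intro hk hn
    exact (this.mp hn) hk
  · intro hn
    by_contra hk
    exact hn (this.mpr hk)


theorem dictPyEq_true_iff (d1 d2 : PySem.Dict Int Int) (h1 : d1.keys.Nodup) (h2 : d2.keys.Nodup) :
    dictPyEq d1 d2 = true ↔ ∀ v, d1.get? v = d2.get? v := by
  unfold dictPyEq
  rw [Bool.and_eq_true, beq_iff_eq, List.all_eq_true]
  constructor
  · rintro ⟨hsz, hall⟩ v
    cases hv : d1.get? v with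
    | some w =>
      have hm := PySem.Dict.mem_items_of_get?_eq_some d1 hv
      have := hall _ hm
      simp only [beq_iff_eq] at this
      rw [this]
    | none =>
      have hsub : d1.keys ⊆ d2.keys := by
        intro k hk
        rw [mem_keys_iff_get?_ne_none] at hk
        obtain ⟨w, hw⟩ := Option.ne_none_iff_exists'.mp hk
        have := hall _ (PySem.Dict.mem_items_of_get?_eq_some d1 hw)
        simp only [beq_iff_eq] at this
        rw [mem_keys_iff_get?_ne_none, this]
        simp
      have hperm : d1.keys.Perm d2.keys :=
        (h1.subperm hsub).perm_of_length_le (by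
          rw [← size_eq_keys_length, ← size_eq_keys_length, hsz])
      have : v ∉ d2.keys := fun hm =>
        (PySem.Dict.get?_eq_none_iff_not_mem_keys d1 v).mp hv (hperm.mem_iff.mpr hm)
      rw [(PySem.Dict.get?_eq_none_iff_not_mem_keys d2 v).mpr this]
  · intro h
    have hkeys : d1.keys.Perm d2.keys := by
      refine (List.perm_ext_iff_of_nodup h1 h2).mpr ?_
      intro k
      rw [mem_keys_iff_get?_ne_none, mem_keys_iff_get?_ne_none, h k]
    refine ⟨by rw [size_eq_keys_length, size_eq_keys_length, hkeys.length_eq], ?_⟩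
    rintro ⟨k, w⟩ hkw
    have := PySem.Dict.get?_of_mem_items d1 hkw h1
    rw [h k] at this
    simp [this]


-- Python's sorted(·, reverse=True) without a key depends only on the multiset of elements.
theorem sorted_rev_id_congr_perm (xs ys : List Int) (h : xs.Perm ys) :
    PySem.List.sorted xs (fun x => x) true = PySem.List.sorted ys (fun x => x) true := by
  refine List.Perm.eq_of_pairwise (le := fun a b : Int => b ≤ a)
    (fun a b _ _ h1 h2 => le_antisymm h2 h1)
    (PySem.List.sorted_pairwise_rev xs (fun x => x))
    (PySem.List.sorted_pairwise_rev ys (fun x => x))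
    (((PySem.List.sorted_perm xs _ _).trans h).trans (PySem.List.sorted_perm ys _ _).symm)

-- A's cell (sorted-sequence equality) coincides with B's cell (counter-dict equality).
theorem cell_eq (nc : List Int) (n : Nat) (nb1 nb2 : List Int) :
    (PySem.List.sorted (rowList nc n nb1) (fun x => x) true
      == PySem.List.sorted (rowList nc n nb2) (fun x => x) true)
    = dictPyEq (cFun nc n nb1) (cFun nc n nb2) := by
  rw [Bool.eq_iff_iff]
  simp only [beq_iff_eq]
  rw [dictPyEq_true_iff _ _ (nodup_keys_cFun nc n nb1) (nodup_keys_cFun nc n nb2)]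
  constructor
  · intro h v
    have hperm : (rowList nc n nb1).Perm (rowList nc n nb2) :=
      (PySem.List.sorted_perm (rowList nc n nb1) (fun x => x) true).symm.trans
        (h ▸ PySem.List.sorted_perm (rowList nc n nb2) (fun x => x) true)
    rw [get?_cFun_char, get?_cFun_char, List.perm_iff_count.mp hperm v]
  · intro h
    refine sorted_rev_id_congr_perm _ _ (List.perm_iff_count.mpr ?_)
    intro v
    have hv := h v
    rw [get?_cFun_char, get?_cFun_char] at hv
    by_cases h1 : (rowList nc n nb1).count v = 0 <;>
      by_cases h2 : (rowList nc n nb2).count v = 0 <;>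
      simp [h1, h2] at hv ⊢ <;> omega

theorem matrix_eq (neighbours : List (List Int)) (nc : List Int) :
    support_matrix_py neighbours nc = support_matrix_py_alt neighbours nc := by
  unfold support_matrix_py support_matrix_py_alt
  set n := neighbours.length with hn
  show (PySem.List.pyRange 0 (n : Int) 1).map (fun left =>
      (PySem.List.pyRange 0 (n : Int) 1).map (fun right =>
        PySem.List.pyGetD (neighbours.map (fun nb =>
            PySem.List.sorted (rowList nc n nb) (fun x => x) true)) left [] ==
        PySem.List.pyGetD (neighbours.map (fun nb =>
            PySem.List.sorted (rowList nc n nb) (fun x => x) true)) right []))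
    = (PySem.List.pyRange 0 (n : Int) 1).map (fun left =>
        (PySem.List.pyRange 0 (n : Int) 1).map (fun right =>
          dictPyEq
            (PySem.List.pyGetD (neighbours.foldl (fun acc x => acc ++ [cFun nc n x]) [])
              left PySem.Dict.empty)
            (PySem.List.pyGetD (neighbours.foldl (fun acc x => acc ++ [cFun nc n x]) [])
              right PySem.Dict.empty)))
  rw [PySem.List.foldl_append_singleton_eq_map (cFun nc n) neighbours []]
  rw [List.nil_append]
  apply List.ext_getElem
  · simp
  · intro i hi1 hi2
    apply List.ext_getElem
    · simp
    · intro j hj1 hj2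
      have hin : i < neighbours.length := by
        simpa [PySem.List.length_pyRange_one] using hi1
      have hjn : j < neighbours.length := by
        simpa [PySem.List.length_pyRange_one] using hj1
      simp only [List.getElem_map, PySem.List.getElem_pyRange_one, zero_add,
        PySem.List.pyGetD_natCast]
      rw [List.getD_eq_getElem _ _ (by simpa using hin : i < (neighbours.map (fun nb => PySem.List.sorted (rowList nc n nb) (fun x => x) true)).length),
          List.getD_eq_getElem _ _ (by simpa using hjn : j < (neighbours.map (fun nb => PySem.List.sorted (rowList nc n nb) (fun x => x) true)).length),
          List.getD_eq_getElem _ _ (by simpa using hin : i < (neighbours.map (cFun nc n)).length),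
          List.getD_eq_getElem _ _ (by simpa using hjn : j < (neighbours.map (cFun nc n)).length),
          List.getElem_map, List.getElem_map, List.getElem_map, List.getElem_map]
      exact cell_eq nc n neighbours[i] neighbours[j]

-- ===== VERDICT (by name: the statement is the Claim_ definition above) =====
theorem support_matrix_py_spec : Claim_equal_support_matrix_py := by
  intro neighbours nc _ _
  unfold Spec_support_matrix_py
  exact matrix_eq neighbours nc
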